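-- pv_equiv track=rewrite | github.com/rctillquist20/random-geometric-graphs | geohat.py | is_resolving_set
-- ===== SOURCE A (Python) =====
-- def is_resolving_set(distance_matrix, test_set):
--     seen_rows = set()
--
--     for row in distance_matrix:
--         row_tuple = tuple([row[i] for i in test_set])
--         if row_tuple in seen_rows:
--             return False
--         seen_rows.add(row_tuple)
--
--     return True
-- ===== SOURCE B (Python) =====
-- def is_resolving_set(distance_matrix, test_set):
--     rest = distance_matrix
--     while rest:
--         first = rest[0]
--         rest = rest[1:]
--         for other in rest:
--             if all(first[t] == other[t] for t in test_set):
--                 return False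
--     return True
-- ===== Notes on version B (the rewrite author's own statement) =====
-- stated objective: alternative
-- what changed: Replaces A's hash-set streaming uniqueness check with a brute-force pairwise scan: each row is compared elementwise at the test_set positions against every later row, with no tuples and no set.
import Mathlib
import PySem

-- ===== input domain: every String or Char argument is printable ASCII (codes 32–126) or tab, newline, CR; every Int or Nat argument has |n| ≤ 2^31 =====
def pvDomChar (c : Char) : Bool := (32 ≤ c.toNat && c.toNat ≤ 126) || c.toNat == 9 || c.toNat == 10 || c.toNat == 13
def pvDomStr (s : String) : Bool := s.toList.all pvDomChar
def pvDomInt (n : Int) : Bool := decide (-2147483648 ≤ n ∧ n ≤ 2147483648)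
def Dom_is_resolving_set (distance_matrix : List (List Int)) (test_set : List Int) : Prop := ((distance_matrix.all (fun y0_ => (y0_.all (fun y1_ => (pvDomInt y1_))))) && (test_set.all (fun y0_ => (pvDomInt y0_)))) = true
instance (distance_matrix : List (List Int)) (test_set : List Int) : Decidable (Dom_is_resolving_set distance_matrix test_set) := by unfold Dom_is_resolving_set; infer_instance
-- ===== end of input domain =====

-- B drops the hash set entirely: it compares every row elementwise against every
-- later row at the test_set positions (brute-force pairwise scan; objective: alternative).

-- ===== PORT A =====
-- the loop 'for row in distance_matrix' with state seen_rows, early return False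
def pvLoopA (test_set : List Int) : List (List Int) → PySem.Set (List Int) → Bool
  | [], _ => true
  | row :: rest, seen =>
      let row_tuple := test_set.map (fun i => PySem.List.pyGetD row i 0)
      if PySem.Set.contains seen row_tuple then false
      else pvLoopA test_set rest (PySem.Set.add seen row_tuple)

def is_resolving_set (distance_matrix : List (List Int)) (test_set : List Int) : Bool :=
  pvLoopA test_set distance_matrix PySem.Set.empty

-- ===== PORT B =====
-- 'all(first[t] == other[t] for t in test_set)'
def pvMatch (test_set : List Int) (first other : List Int) : Bool :=
  test_set.all (fun t => PySem.List.pyGetD first t 0 == PySem.List.pyGetD other t 0)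

-- the 'while rest:' loop; the inner 'for other in rest: … return False' is the any
def pvLoopB (test_set : List Int) : List (List Int) → Bool
  | [] => true
  | first :: rest =>
      if rest.any (pvMatch test_set first) then false
      else pvLoopB test_set rest

def is_resolving_set_alt (distance_matrix : List (List Int)) (test_set : List Int) : Bool :=
  pvLoopB test_set distance_matrix

-- ===== PRECONDITION & SPEC =====
-- Pre_ excludes exactly the inputs where some row[i] is out of range, on which A raises IndexError.
def Pre_is_resolving_set (distance_matrix : List (List Int)) (test_set : List Int) : Prop :=
  ∀ row ∈ distance_matrix, ∀ i ∈ test_set, PySem.Raise.InRange row.length i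
instance (distance_matrix : List (List Int)) (test_set : List Int) : Decidable (Pre_is_resolving_set distance_matrix test_set) := by unfold Pre_is_resolving_set; infer_instance

def pvWitness_is_resolving_set : List (List Int) × List Int := ([[1, 2], [3, 4]], [0, 1])

def Spec_is_resolving_set (distance_matrix : List (List Int)) (test_set : List Int) (out : Bool) : Prop := out = is_resolving_set_alt distance_matrix test_set
instance (distance_matrix : List (List Int)) (test_set : List Int) (out : Bool) : Decidable (Spec_is_resolving_set distance_matrix test_set out) := by unfold Spec_is_resolving_set; infer_instance

-- ===== CLAIM (what is proved, stated in full; the proofs are below) =====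
def Claim_equal_is_resolving_set : Prop := ∀ (distance_matrix : List (List Int)) (test_set : List Int), Dom_is_resolving_set distance_matrix test_set → Pre_is_resolving_set distance_matrix test_set → Spec_is_resolving_set distance_matrix test_set (is_resolving_set distance_matrix test_set)

-- ===== LEMMAS AND PROOFS =====

-- A's loop succeeds iff the projections of the remaining rows are pairwise distinct
-- and avoid everything already seen.
theorem pvLoopA_eq_true_iff (ts : List Int) (rows : List (List Int)) (seen : PySem.Set (List Int)) :
    pvLoopA ts rows seen = true ↔
      ((rows.map ((fun row => ts.map (fun i => PySem.List.pyGetD row i 0)))).Nodup ∧ ∀ t ∈ rows.map ((fun row => ts.map (fun i => PySem.List.pyGetD row i 0))), t ∉ seen) := by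
  induction rows generalizing seen with
  | nil => simp [pvLoopA]
  | cons row rest ih =>
      simp only [pvLoopA]
      by_cases h : ts.map (fun i => PySem.List.pyGetD row i 0) ∈ seen
      · rw [if_pos ((PySem.Set.contains_iff seen _).mpr h)]
        simp only [List.map_cons, List.mem_cons, Bool.false_eq_true, false_iff, not_and]
        intro _ hall
        exact absurd h (hall _ (Or.inl rfl))
      · rw [if_neg (fun hc => h ((PySem.Set.contains_iff seen _).mp hc)), ih]
        simp only [List.map_cons, List.nodup_cons, List.mem_cons]
        constructor
        · rintro ⟨hnd, havoid⟩
          refine ⟨⟨fun hm => ?_, hnd⟩, ?_⟩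
          · exact (havoid _ hm) ((PySem.Set.mem_add seen _ _).mpr (Or.inr rfl))
          · rintro t (rfl | ht)
            · exact h
            · intro hs
              exact (havoid t ht) ((PySem.Set.mem_add seen _ _).mpr (Or.inl hs))
        · rintro ⟨⟨hnotmem, hnd⟩, havoid⟩
          refine ⟨hnd, fun t ht hadd => ?_⟩
          rcases (PySem.Set.mem_add seen _ _).mp hadd with hs | rfl
          · exact (havoid t (Or.inr ht)) hs
          · exact hnotmem ht

-- elementwise match at the test positions = equality of the projections
theorem pvMatch_iff (ts : List Int) (r1 r2 : List Int) :
    pvMatch ts r1 r2 = true ↔ ts.map (fun i => PySem.List.pyGetD r1 i 0) = ts.map (fun i => PySem.List.pyGetD r2 i 0) := by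
  simp [pvMatch, List.all_eq_true, List.map_inj_left]

-- B's loop succeeds iff the projections are pairwise distinct
theorem pvLoopB_eq_true_iff (ts : List Int) (rows : List (List Int)) :
    pvLoopB ts rows = true ↔ (rows.map ((fun row => ts.map (fun i => PySem.List.pyGetD row i 0)))).Nodup := by
  induction rows with
  | nil => simp [pvLoopB]
  | cons first rest ih =>
      simp only [pvLoopB, List.map_cons, List.nodup_cons]
      by_cases h : rest.any (pvMatch ts first) = true
      · rw [if_pos h]
        rcases List.any_eq_true.mp h with ⟨o, ho, hm⟩
        simp only [Bool.false_eq_true, false_iff, not_and]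
        intro hnm _
        exact hnm (List.mem_map.mpr ⟨o, ho, ((pvMatch_iff ts first o).mp hm).symm⟩)
      · rw [if_neg h, ih]
        have : ts.map (fun i => PySem.List.pyGetD first i 0) ∉ rest.map ((fun row => ts.map (fun i => PySem.List.pyGetD row i 0))) := by
          intro hm
          rcases List.mem_map.mp hm with ⟨o, ho, he⟩
          exact h (List.any_eq_true.mpr ⟨o, ho, (pvMatch_iff ts first o).mpr he.symm⟩)
        tauto

-- ===== VERDICT (by name: the statement is the Claim_ definition above) =====
theorem is_resolving_set_spec : Claim_equal_is_resolving_set := by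
  intro dm ts _ _
  unfold Spec_is_resolving_set is_resolving_set is_resolving_set_alt
  rw [Bool.eq_iff_iff, pvLoopA_eq_true_iff, pvLoopB_eq_true_iff]
  constructor
  · rintro ⟨hnd, -⟩; exact hnd
  · intro hnd; exact ⟨hnd, by simp [PySem.Set.empty]⟩
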